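-- pv_equiv track=rewrite | github.com/KAGARI1115/bursteditstats | func.py | countP
-- ===== SOURCE A (Python) =====
-- def countP(n, k):
--
--     # Table to store results of subproblems
--     dp = [[0 for i in range(k + 1)]
--              for j in range(n + 1)]
--
--     # Base cases
--     for i in range(n + 1):
--         dp[i][0] = 0
--
--     for i in range(k + 1):
--         dp[0][k] = 0
--
--     # Fill rest of the entries in
--     # dp[][] in bottom up manner
--     for i in range(1, n + 1):
--         for j in range(1, k + 1):
--             if (j == 1 or i == j):
--                 dp[i][j] = 1
--             else:
--                 dp[i][j] = (j * dp[i - 1][j] +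
--                                 dp[i - 1][j - 1])
--
--     return dp
-- ===== SOURCE B (Python) =====
-- def countP(n, k):
--     # Demand-driven memoized evaluation: base cells (column 1 and the diagonal)
--     # are seeded into a flat memo; an explicit worklist then resolves each needed
--     # cell top-down from its two parents; cells never demanded (j > i) stay 0.
--     W = k + 2                            # cell (i, j) lives at i*W + j
--     lim = n if n < k else k
--     memo = [None] * ((n + 1) * W) if k >= 1 else []
--     if k >= 1:
--         for i in range(1, n + 1):        # S(i, 1) = 1
--             memo[i * W + 1] = 1
--         for j in range(2, lim + 1):      # S(j, j) = 1
--             memo[j * W + j] = 1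
--     stack = [n * W + j for j in range(lim, 1, -1)]
--     push = stack.append
--     pop = stack.pop
--     while stack:
--         c = stack[-1]
--         if memo[c] is not None:
--             pop()
--             continue
--         a = c - W                        # parent (i-1, j)
--         va = memo[a]
--         if va is None:
--             push(a)
--             continue
--         vb = memo[a - 1]                 # parent (i-1, j-1)
--         if vb is None:
--             push(a - 1)
--             continue
--         memo[c] = (c % W) * va + vb
--         pop()
--     out = []
--     for i in range(n + 1):
--         row = [0] * (k + 1)
--         if 1 <= i and 1 <= k:
--             row[1] = 1
--             if 2 <= i <= k:
--                 row[i] = 1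
--             base = i * W
--             m = i if i <= k + 1 else k + 1
--             row[2:m] = memo[base + 2 : base + m]
--         out.append(row)
--     return out
-- ===== Notes on version B (the rewrite author's own statement) =====
-- stated objective: alternative
-- what changed: B replaces A's unconditional bottom-up fill of the whole (n+1)x(k+1) table by a demand-driven memoized evaluation: base cells (column 1, diagonal) are seeded into a flat memo, an explicit worklist resolves top-down only the cells that can be nonzero (j <= min(i,k)), the j > i region is never computed, and the rows are assembled from the memo afterwards.
import Mathlib
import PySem

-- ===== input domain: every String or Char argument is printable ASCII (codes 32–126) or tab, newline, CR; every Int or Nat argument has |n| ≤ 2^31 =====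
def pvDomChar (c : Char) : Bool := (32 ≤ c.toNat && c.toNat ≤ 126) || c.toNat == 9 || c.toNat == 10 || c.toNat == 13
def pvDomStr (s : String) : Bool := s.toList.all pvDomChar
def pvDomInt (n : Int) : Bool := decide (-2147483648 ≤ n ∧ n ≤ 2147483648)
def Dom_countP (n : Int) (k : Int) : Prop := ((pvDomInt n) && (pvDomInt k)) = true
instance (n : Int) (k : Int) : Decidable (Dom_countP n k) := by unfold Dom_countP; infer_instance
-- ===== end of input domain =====

-- B replaces A's unconditional bottom-up fill of the whole table by a demand-driven memoized
-- worklist that computes only the cells that can be nonzero (j ≤ min(i,k)); objective: alternative.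

-- ===== PORT A =====
-- Python list assignment dp[i][j] = v / reads dp[i][j]: on every input admitted by
-- Pre_countP all indices are nonnegative and in range, where .toNat + List.set/getD
-- are exact transcriptions of Python's list indexing.
def countP (n : Int) (k : Int) : List (List Int) :=
  let dp0 := (PySem.List.pyRange 0 (n+1) 1).map
      (fun _ => (PySem.List.pyRange 0 (k+1) 1).map (fun _ => (0:Int)))
  -- for i in range(n + 1): dp[i][0] = 0
  let dp1 := (PySem.List.pyRange 0 (n+1) 1).foldl
      (fun dp i => dp.set i.toNat ((dp.getD i.toNat []).set 0 0)) dp0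
  -- for i in range(k + 1): dp[0][k] = 0
  let dp2 := (PySem.List.pyRange 0 (k+1) 1).foldl
      (fun dp _ => dp.set 0 ((dp.getD 0 []).set k.toNat 0)) dp1
  -- bottom-up fill
  (PySem.List.pyRange 1 (n+1) 1).foldl (fun dp i =>
    (PySem.List.pyRange 1 (k+1) 1).foldl (fun dp j =>
      let v : Int := if j = 1 ∨ i = j then 1
        else j * ((dp.getD (i-1).toNat []).getD j.toNat 0)
               + ((dp.getD (i-1).toNat []).getD (j-1).toNat 0)
      dp.set i.toNat ((dp.getD i.toNat []).set j.toNat v)) dp) dp2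

-- ===== PORT B =====
-- transliteration of Source B. The Python 'while stack' loop is ported as stepB/runB with a
-- fuel argument that only makes the loop total (fuel is proved sufficient below); the
-- Python stack grows and pops at the list END, represented head-first here (hence the
-- .reverse on the seed list, whose Python comprehension runs j = lim, lim-1, ..., 2).
def stepB (W : Int) (memo : List (Option Int)) (stack : List Int) :
    List (Option Int) × List Int :=
  match stack with
  | [] => (memo, [])
  | c :: rest =>
    match memo.getD c.toNat none with
    | some _ => (memo, rest)
    | none =>
      let a := c - W
      match memo.getD a.toNat none with
      | none => (memo, a :: c :: rest)
      | some va =>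
        match memo.getD (a - 1).toNat none with
        | none => (memo, (a - 1) :: c :: rest)
        | some vb => (memo.set c.toNat (some (PySem.Int.mod c W * va + vb)), rest)

def runB (W : Int) : Nat → List (Option Int) → List Int → List (Option Int) × List Int
  | 0, memo, stack => (memo, stack)
  | fuel + 1, memo, stack =>
    match stack with
    | [] => (memo, [])
    | _ => runB W fuel (stepB W memo stack).1 (stepB W memo stack).2

def countP_alt (n : Int) (k : Int) : List (List Int) :=
  let W := k + 2
  let lim := if n < k then n else k
  let memo0 : List (Option Int) :=
    if 1 ≤ k then List.replicate ((n+1)*W).toNat none else []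
  let memo1 :=
    if 1 ≤ k then
      (PySem.List.pyRange 2 (lim+1) 1).foldl (fun m j => m.set (j*W+j).toNat (some 1))
        ((PySem.List.pyRange 1 (n+1) 1).foldl (fun m i => m.set (i*W+1).toNat (some 1)) memo0)
    else memo0
  let stack0 := ((PySem.List.pyRange lim 1 (-1)).map (fun j => n*W+j)).reverse
  let memoF := (runB W (((n+1)*W).toNat * 2 + 4) memo1 stack0).1
  (PySem.List.pyRange 0 (n+1) 1).map (fun i =>
    let row0 : List Int := List.replicate (k+1).toNat 0
    if 1 ≤ i ∧ 1 ≤ k then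
      let row1 := row0.set 1 1
      let row2 := if 2 ≤ i ∧ i ≤ k then row1.set i.toNat 1 else row1
      let base := i * W
      let m := if i ≤ k + 1 then i else k + 1
      -- slice assignment row[2:m] = memo[base+2 : base+m]; on admitted inputs every
      -- sliced memo entry is an integer (proved below), so '.getD 0' never supplies 0
      row2.take 2 ++ (PySem.List.slice memoF (some (base+2)) (some (base+m))).map (fun o => o.getD 0)
        ++ row2.drop (max 2 m).toNat
    else row0)

-- ===== PRECONDITION & SPEC =====
-- A raises IndexError as soon as exactly one of n, k is negative (the base-case loops
-- index the empty table / empty rows); Pre_ excludes exactly those inputs.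
def Pre_countP (n : Int) (k : Int) : Prop := (0 ≤ n ∧ 0 ≤ k) ∨ (n < 0 ∧ k < 0)
instance (n : Int) (k : Int) : Decidable (Pre_countP n k) := by unfold Pre_countP; infer_instance

def pvWitness_countP : Int × Int := (3, 2)

def Spec_countP (n : Int) (k : Int) (out : List (List Int)) : Prop := out = countP_alt n k
instance (n : Int) (k : Int) (out : List (List Int)) : Decidable (Spec_countP n k out) := by unfold Spec_countP; infer_instance

-- ===== CLAIM (what is proved, stated in full; the proofs are below) =====
def Claim_equal_countP : Prop := ∀ (n : Int) (k : Int), Dom_countP n k → Pre_countP n k → Spec_countP n k (countP n k)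

-- ===== LEMMAS AND PROOFS =====

-- Standard Stirling numbers of the second kind (proof-side reference function).
def S : Nat → Nat → Int
  | 0, 0 => 1
  | 0, _+1 => 0
  | _+1, 0 => 0
  | i+1, j+1 => (j+1) * S i (j+1) + S i j

-- The value A's table holds at cell (i, j).
def cellA : Nat → Nat → Int
  | 0, _ => 0
  | _+1, 0 => 0
  | i+1, j+1 => if j + 1 = 1 ∨ i + 1 = j + 1 then 1
                else (j+1) * cellA i (j+1) + cellA i j

theorem S_ss (i j : Nat) : S (i+1) (j+1) = ((j:Int)+1) * S i (j+1) + S i j := rfl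
theorem S_zs (j : Nat) : S 0 (j+1) = 0 := rfl
theorem S_sz (i : Nat) : S (i+1) 0 = 0 := rfl
theorem S_zz : S 0 0 = 1 := rfl
theorem cellA_ss (i j : Nat) : cellA (i+1) (j+1)
    = if j + 1 = 1 ∨ i + 1 = j + 1 then 1
      else ((j:Int)+1) * cellA i (j+1) + cellA i j := rfl

theorem S_zero_of_lt : ∀ i j : Nat, i < j → S i j = 0 := by
  intro i
  induction i with
  | zero =>
    intro j h
    cases j with
    | zero => omega
    | succ j => rfl
  | succ i ih =>
    intro j h
    cases j with
    | zero => omega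
    | succ j =>
      rw [S_ss, ih (j+1) (by omega), ih j (by omega)]
      ring

theorem S_one : ∀ i : Nat, S (i+1) 1 = 1 := by
  intro i
  induction i with
  | zero => rfl
  | succ i ih =>
    rw [show (1:Nat) = 0 + 1 from rfl, S_ss]
    rw [show (1:Nat) = 0 + 1 from rfl] at ih
    rw [ih, S_sz]
    ring

theorem S_diag : ∀ i : Nat, S i i = 1 := by
  intro i
  induction i with
  | zero => rfl
  | succ i ih =>
    rw [S_ss, S_zero_of_lt i (i+1) (by omega), ih]
    ring

theorem cellA_eq_S : ∀ i j : Nat, 0 < j → cellA i j = S i j := by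
  intro i
  induction i with
  | zero =>
    intro j hj
    cases j with
    | zero => omega
    | succ j => rfl
  | succ i ih =>
    intro j hj
    cases j with
    | zero => omega
    | succ j =>
      rw [cellA_ss, S_ss]
      by_cases hc : j + 1 = 1 ∨ i + 1 = j + 1
      · rw [if_pos hc]
        rcases hc with hc | hc
        · have hj0 : j = 0 := by omega
          subst hj0
          cases i with
          | zero => rw [S_zs, S_zz]; ring
          | succ i' => rw [S_sz, show (0+1:Nat) = 1 from rfl, S_one]; ring
        · have hij : i = j := by omega
          subst hij
          rw [S_zero_of_lt i (i+1) (by omega), S_diag]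
          ring
      · rw [if_neg hc]
        push_neg at hc
        rw [ih (j+1) (by omega), ih j (by omega)]

def zrowL (K : Nat) : List Int := List.replicate (K+1) 0
def rowA (K i : Nat) : List Int := (List.range (K+1)).map (fun j => cellA i j)
def dpSt (N K I : Nat) : List (List Int) :=
  (List.range (N+1)).map (fun r => if r ≤ I then rowA K r else zrowL K)
def prow (K Ii J : Nat) : List Int :=
  (List.range (K+1)).map (fun j => if j = 0 ∨ J < j then 0 else cellA Ii j)

theorem set_getD_self {α : Type} : ∀ (l : List α) (i : Nat) (d : α), l.set i (l.getD i d) = l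
  | [], _, _ => rfl
  | _ :: _, 0, _ => rfl
  | a :: l, i+1, d => congrArg (a :: ·) (set_getD_self l i d)

theorem foldl_fixed_mem {α β : Type} (f : α → β → α) (a : α) :
    ∀ (L : List β), (∀ x ∈ L, f a x = a) → L.foldl f a = a
  | [], _ => rfl
  | x :: L, h => by
      rw [List.foldl_cons, h x (List.mem_cons_self)]
      exact foldl_fixed_mem f a L (fun y hy => h y (List.mem_cons_of_mem _ hy))

theorem map_range_set {α : Type} (n m : Nat) (f : Nat → α) (v : α) :
    ((List.range n).map f).set m v = (List.range n).map (fun x => if x = m then v else f x) := by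
  apply List.ext_getElem
  · simp
  · intro i h1 h2
    simp only [List.getElem_set, List.getElem_map, List.getElem_range]
    simp only [List.length_set, List.length_map, List.length_range] at h1
    by_cases h : m = i
    · subst h; simp [h1]
    · rw [if_neg h, if_neg (fun hh : i = m => h hh.symm)]

theorem map_range_getD {α : Type} (n m : Nat) (f : Nat → α) (d : α) :
    ((List.range n).map f).getD m d = if m < n then f m else d := by
  by_cases h : m < n <;> simp [List.getD, List.getElem?_map, List.getElem?_range, h]

theorem zrowL_eq_rowA0 (K : Nat) : rowA K 0 = zrowL K := by
  unfold rowA zrowL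
  rw [show (fun j => cellA 0 j) = (fun _ : Nat => (0:Int)) from rfl, List.map_const']
  simp

theorem dpSt_zero (N K : Nat) : dpSt N K 0 = List.replicate (N+1) (zrowL K) := by
  unfold dpSt
  rw [show (fun r => if r ≤ 0 then rowA K r else zrowL K) = (fun _ : Nat => zrowL K) from ?_,
    List.map_const']
  · simp
  · funext r
    by_cases h : r ≤ 0
    · simp [h, show r = 0 by omega, zrowL_eq_rowA0]
    · simp [h]

theorem prow_last (K Ii : Nat) : prow K Ii K = rowA K Ii := by
  unfold prow rowA
  apply List.map_congr_left
  intro j hj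
  rw [List.mem_range] at hj
  by_cases h : j = 0
  · subst h
    cases Ii <;> simp [cellA]
  · simp [h, show ¬ K < j by omega]

theorem dpSt_succ (N K I : Nat) (h : I + 1 ≤ N) :
    (dpSt N K I).set (I+1) (rowA K (I+1)) = dpSt N K (I+1) := by
  unfold dpSt
  rw [map_range_set]
  apply List.map_congr_left
  intro r hr
  rw [List.mem_range] at hr
  by_cases h1 : r = I + 1
  · simp [h1]
  · by_cases h2 : r ≤ I <;> simp [h1, h2, show (r ≤ I+1) = (r ≤ I) from by
      apply propext; omega]

theorem dpSt_getD (N K I r : Nat) :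
    (dpSt N K I).getD r [] = if r < N+1 then (if r ≤ I then rowA K r else zrowL K) else [] :=
  map_range_getD _ _ _ _

theorem length_dpSt (N K I : Nat) : (dpSt N K I).length = N + 1 := by
  simp [dpSt]

theorem prow_zero (K Ii : Nat) : prow K Ii 0 = zrowL K := by
  unfold prow zrowL
  rw [show (fun j => if j = 0 ∨ 0 < j then (0:Int) else cellA Ii j)
        = (fun _ : Nat => (0:Int)) from funext (fun j => if_pos (by omega)), List.map_const']
  simp

theorem rowA_getD (K i j : Nat) (h : j < K + 1) : (rowA K i).getD j 0 = cellA i j := by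
  rw [rowA, map_range_getD, if_pos h]

theorem prow_set (K Ii J : Nat) (hJ : J + 1 ≤ K) :
    (prow K Ii J).set (J+1) (cellA Ii (J+1)) = prow K Ii (J+1) := by
  unfold prow
  rw [map_range_set]
  apply List.map_congr_left
  intro x hx
  rw [List.mem_range] at hx
  by_cases h1 : x = J + 1
  · simp [h1]
  · by_cases h2 : x = 0 ∨ J < x
    · rw [if_neg h1, if_pos h2, if_pos (by omega)]
    · rw [if_neg h1, if_neg h2, if_neg (by omega)]

-- one inner-loop step
theorem inner_step (N K I J : Nat) (hI : I + 1 ≤ N) (hJ : J + 1 ≤ K)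
    (dp : List (List Int)) (hdp : dp = (dpSt N K I).set (I+1) (prow K (I+1) J)) :
    dp.set (((I:Int)+1)).toNat
      ((dp.getD (((I:Int)+1)).toNat []).set (((J:Int)+1)).toNat
        (if ((J:Int)+1) = 1 ∨ ((I:Int)+1) = ((J:Int)+1) then 1
         else ((J:Int)+1) * ((dp.getD (((I:Int)+1)-1).toNat []).getD (((J:Int)+1)).toNat 0)
               + ((dp.getD (((I:Int)+1)-1).toNat []).getD (((J:Int)+1)-1).toNat 0)))
      = (dpSt N K I).set (I+1) (prow K (I+1) (J+1)) := by
  have hti : (((I:Int)+1)).toNat = I + 1 := by omega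
  have htj : (((J:Int)+1)).toNat = J + 1 := by omega
  have hti1 : ((((I:Int)+1)) - 1).toNat = I := by omega
  have htj1 : ((((J:Int)+1)) - 1).toNat = J := by omega
  rw [hti, htj, hti1, htj1]
  have hprev : dp.getD I [] = rowA K I := by
    rw [hdp]
    have : ((dpSt N K I).set (I+1) (prow K (I+1) J)).getD I []
        = (dpSt N K I).getD I [] := by
      simp [List.getD, List.getElem?_set_ne (show I+1 ≠ I by omega)]
    rw [this, dpSt_getD, if_pos (by omega), if_pos (by omega)]
  have hcur : dp.getD (I+1) [] = prow K (I+1) J := by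
    rw [hdp]
    simp [List.getD, List.getElem?_set_self (show I+1 < (dpSt N K I).length by
      rw [length_dpSt]; omega)]
  rw [hprev, hcur, rowA_getD K I (J+1) (by omega), rowA_getD K I J (by omega)]
  have hv : (if ((J:Int)+1) = 1 ∨ ((I:Int)+1) = ((J:Int)+1) then (1:Int)
      else ((J:Int)+1) * cellA I (J+1) + cellA I J) = cellA (I+1) (J+1) := by
    show _ = if J + 1 = 1 ∨ I + 1 = J + 1 then 1 else (↑(J+1)) * cellA I (J+1) + cellA I J
    by_cases hc : J + 1 = 1 ∨ I + 1 = J + 1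
    · rw [if_pos (by omega), if_pos hc]
    · rw [if_neg (by omega), if_neg hc,
        show ((J+1 : Nat) : Int) = (J:Int)+1 by omega]
  rw [hv, hdp, List.set_set, prow_set K (I+1) J hJ]

theorem inner_fold (N K I : Nat) (hI : I + 1 ≤ N) :
    ∀ J, J ≤ K →
    (PySem.List.pyRange 1 ((J:Int)+1) 1).foldl (fun dp j =>
      dp.set (((I:Int)+1)).toNat
        ((dp.getD (((I:Int)+1)).toNat []).set j.toNat
          (if j = 1 ∨ ((I:Int)+1) = j then 1
           else j * ((dp.getD (((I:Int)+1)-1).toNat []).getD j.toNat 0)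
                 + ((dp.getD (((I:Int)+1)-1).toNat []).getD (j-1).toNat 0))))
      (dpSt N K I)
      = (dpSt N K I).set (I+1) (prow K (I+1) J) := by
  intro J
  induction J with
  | zero =>
    intro _
    rw [PySem.List.pyRange_one_eq_nil (show ((0:Nat):Int)+1 ≤ 1 by omega),
      List.foldl_nil, prow_zero]
    conv => lhs; rw [← set_getD_self (dpSt N K I) (I+1) []]
    rw [dpSt_getD, if_pos (by omega), if_neg (by omega)]
  | succ J ih =>
    intro hJK
    rw [show ((J+1:Nat):Int)+1 = ((J:Int)+1)+1 by omega,
      PySem.List.pyRange_one_succ_right (show (1:Int) ≤ (J:Int)+1 by omega),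
      List.foldl_append, ih (by omega), List.foldl_cons, List.foldl_nil]
    exact inner_step N K I J hI (by omega) _ rfl

theorem outer_fold (N K : Nat) :
    ∀ I, I ≤ N →
    (PySem.List.pyRange 1 ((I:Int)+1) 1).foldl (fun dp i =>
      (PySem.List.pyRange 1 ((K:Int)+1) 1).foldl (fun dp j =>
        dp.set i.toNat ((dp.getD i.toNat []).set j.toNat
          (if j = 1 ∨ i = j then 1
           else j * ((dp.getD (i-1).toNat []).getD j.toNat 0)
                 + ((dp.getD (i-1).toNat []).getD (j-1).toNat 0)))) dp)
      (List.replicate (N+1) (zrowL K))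
      = dpSt N K I := by
  intro I
  induction I with
  | zero =>
    intro _
    rw [PySem.List.pyRange_one_eq_nil (show ((0:Nat):Int)+1 ≤ 1 by omega),
      List.foldl_nil, dpSt_zero]
  | succ I ih =>
    intro hIN
    rw [show ((I+1:Nat):Int)+1 = ((I:Int)+1)+1 by omega,
      PySem.List.pyRange_one_succ_right (show (1:Int) ≤ (I:Int)+1 by omega),
      List.foldl_append, ih (by omega), List.foldl_cons, List.foldl_nil,
      inner_fold N K I hIN K (by omega), prow_last, dpSt_succ N K I hIN]

theorem countP_eq (N K : Nat) :
    countP (N : Int) (K : Int)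
      = (List.range (N+1)).map (fun i => (List.range (K+1)).map (fun j => cellA i j)) := by
  have htgt : (List.range (N+1)).map (fun i => (List.range (K+1)).map (fun j => cellA i j))
      = dpSt N K N := by
    unfold dpSt
    apply List.map_congr_left
    intro r hr
    rw [List.mem_range] at hr
    rw [if_pos (by omega)]
    rfl
  rw [htgt]
  simp only [countP]
  have hrow : (PySem.List.pyRange 0 ((K:Int)+1) 1).map (fun _ => (0:Int)) = zrowL K := by
    rw [List.map_const', PySem.List.length_pyRange_one,
      show (((K:Int)+1) - 0).toNat = K + 1 from by omega]
    rfl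
  have hdp0 : (PySem.List.pyRange 0 ((N:Int)+1) 1).map
      (fun _ => (PySem.List.pyRange 0 ((K:Int)+1) 1).map (fun _ => (0:Int)))
      = List.replicate (N+1) (zrowL K) := by
    rw [hrow, List.map_const', PySem.List.length_pyRange_one,
      show (((N:Int)+1) - 0).toNat = N + 1 from by omega]
  rw [hdp0]
  have hzset : (zrowL K).set 0 0 = zrowL K := by
    unfold zrowL
    rw [List.replicate_succ]
    rfl
  have hb1 : (PySem.List.pyRange 0 ((N:Int)+1) 1).foldl
      (fun dp i => dp.set i.toNat ((dp.getD i.toNat []).set 0 0))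
      (List.replicate (N+1) (zrowL K)) = List.replicate (N+1) (zrowL K) := by
    apply foldl_fixed_mem
    intro x hx
    rw [PySem.List.mem_pyRange_one] at hx
    have hx' : x.toNat < N + 1 := by omega
    have hg : (List.replicate (N+1) (zrowL K)).getD x.toNat [] = zrowL K := by
      simp [List.getD, List.getElem?_replicate, hx']
    rw [hg, hzset, List.set_replicate_self]
  rw [hb1]
  have hb2 : (PySem.List.pyRange 0 ((K:Int)+1) 1).foldl
      (fun dp _ => dp.set 0 ((dp.getD 0 []).set ((K:Int)).toNat 0))
      (List.replicate (N+1) (zrowL K)) = List.replicate (N+1) (zrowL K) := by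
    apply foldl_fixed_mem
    intro x _
    have hg : (List.replicate (N+1) (zrowL K)).getD 0 [] = zrowL K := by
      simp [List.getD, List.getElem?_replicate]
    have hzK : (zrowL K).set ((K:Int)).toNat 0 = zrowL K := List.set_replicate_self
    rw [hg, hzK, List.set_replicate_self]
  rw [hb2]
  exact outer_fold N K N (by omega)

-- ===== B-side lemmas (worklist machine) =====


-- code of cell (i, j) in the flat memo, and its arithmetic
def codeI (K i j : Nat) : Int := ((i*(K+2)+j : Nat) : Int)

theorem code_div (K i j : Nat) (hj : j < K+2) : (i*(K+2)+j) / (K+2) = i := by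
  rw [Nat.mul_comm, Nat.mul_add_div (by omega), Nat.div_eq_of_lt hj]
  omega

theorem code_mod (K i j : Nat) (hj : j < K+2) : (i*(K+2)+j) % (K+2) = j := by
  rw [Nat.mul_comm, Nat.mul_add_mod, Nat.mod_eq_of_lt hj]

theorem code_lt (N K i j : Nat) (hi : i ≤ N) (hj : j < K+2) :
    i*(K+2)+j < (N+1)*(K+2) := by
  have h := Nat.mul_le_mul_right (K+2) (show i+1 ≤ N+1 by omega)
  have h2 : (i+1)*(K+2) = i*(K+2) + (K+2) := by ring
  omega

theorem codeI_toNat (K i j : Nat) : (codeI K i j).toNat = i*(K+2)+j := Int.toNat_natCast _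

theorem codeI_sub (K i j : Nat) (h : 1 ≤ i) :
    codeI K i j - ((K:Int)+2) = codeI K (i-1) j := by
  unfold codeI
  have hh : i*(K+2)+j = ((i-1)*(K+2)+j) + (K+2) := by
    have h2 : i*(K+2) = (i-1)*(K+2) + (K+2) := by
      cases i with
      | zero => omega
      | succ m => rw [Nat.succ_sub_one, Nat.succ_mul]
    omega
  rw [hh]; push_cast; ring

theorem codeI_sub_one (K i j : Nat) (h : 1 ≤ j) :
    codeI K i j - 1 = codeI K i (j-1) := by
  unfold codeI
  have hh : i*(K+2)+j = (i*(K+2)+(j-1)) + 1 := by omega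
  rw [hh]; push_cast; ring

theorem codeI_mod (K i j : Nat) (hj : j < K+2) :
    PySem.Int.mod (codeI K i j) ((K:Int)+2) = (j:Int) := by
  have hW : ((K:Int)+2) = ((K+2 : Nat) : Int) := by push_cast; ring
  rw [hW, codeI, PySem.Int.mod_natCast, code_mod K i j hj]

-- memo contents at a machine state: column 1 and all diagonal cells seeded, columns
-- 2 .. jc-1 of the triangle fully computed, column jc computed up to row ic
def fillB (N K jc ic : Nat) : List (Option Int) :=
  (List.range ((N+1)*(K+2))).map (fun c =>
    if (c % (K+2) = 1 ∧ 1 ≤ c / (K+2))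
       ∨ (2 ≤ c % (K+2) ∧ c % (K+2) ≤ min N K ∧ c % (K+2) ≤ c / (K+2)
           ∧ (c % (K+2) < jc ∨ c / (K+2) = c % (K+2) ∨ (c % (K+2) = jc ∧ c / (K+2) ≤ ic)))
    then some (S (c / (K+2)) (c % (K+2))) else none)

theorem fillB_getD (N K jc ic i j : Nat) (hi : i ≤ N) (hj : j < K+2) :
    (fillB N K jc ic).getD (i*(K+2)+j) none =
      if (j = 1 ∧ 1 ≤ i)
         ∨ (2 ≤ j ∧ j ≤ min N K ∧ j ≤ i ∧ (j < jc ∨ i = j ∨ (j = jc ∧ i ≤ ic)))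
      then some (S i j) else none := by
  rw [fillB, map_range_getD, if_pos (code_lt N K i j hi hj),
    code_div K i j hj, code_mod K i j hj]

theorem fillB_set (N K jc i : Nat) (h2 : 2 ≤ jc) (hlim : jc ≤ min N K)
    (hji : jc < i) (hiN : i ≤ N) :
    (fillB N K jc (i-1)).set (i*(K+2)+jc) (some (S i jc)) = fillB N K jc i := by
  have hjK : jc < K+2 := by omega
  unfold fillB
  rw [map_range_set]
  apply List.map_congr_left
  intro c hc
  rw [List.mem_range] at hc
  by_cases hcc : c = i*(K+2)+jc
  · subst hcc
    rw [if_pos rfl, code_div K i jc hjK, code_mod K i jc hjK,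
      if_pos (Or.inr ⟨h2, hlim, by omega, Or.inr (Or.inr ⟨rfl, le_refl i⟩)⟩)]
  · rw [if_neg hcc]
    have hd := Nat.div_add_mod c (K+2)
    have hne : ¬(c / (K+2) = i ∧ c % (K+2) = jc) := by
      rintro ⟨hp, hq⟩
      apply hcc
      rw [← hd, hp, hq]; ring
    have hiff : ((c % (K+2) = 1 ∧ 1 ≤ c / (K+2))
         ∨ (2 ≤ c % (K+2) ∧ c % (K+2) ≤ min N K ∧ c % (K+2) ≤ c / (K+2)
             ∧ (c % (K+2) < jc ∨ c / (K+2) = c % (K+2) ∨ (c % (K+2) = jc ∧ c / (K+2) ≤ i - 1))))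
        ↔ ((c % (K+2) = 1 ∧ 1 ≤ c / (K+2))
         ∨ (2 ≤ c % (K+2) ∧ c % (K+2) ≤ min N K ∧ c % (K+2) ≤ c / (K+2)
             ∧ (c % (K+2) < jc ∨ c / (K+2) = c % (K+2) ∨ (c % (K+2) = jc ∧ c / (K+2) ≤ i)))) := by
      omega
    rw [if_congr hiff rfl rfl]

theorem fillB_next (N K jc : Nat) : fillB N K jc N = fillB N K (jc+1) (jc+1) := by
  unfold fillB
  apply List.map_congr_left
  intro c hc
  rw [List.mem_range] at hc
  have hp : c / (K+2) ≤ N := by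
    have := (Nat.div_lt_iff_lt_mul (show 0 < K+2 by omega)).2
      (show c < (N+1)*(K+2) from hc)
    omega
  have hiff : ((c % (K+2) = 1 ∧ 1 ≤ c / (K+2))
       ∨ (2 ≤ c % (K+2) ∧ c % (K+2) ≤ min N K ∧ c % (K+2) ≤ c / (K+2)
           ∧ (c % (K+2) < jc ∨ c / (K+2) = c % (K+2) ∨ (c % (K+2) = jc ∧ c / (K+2) ≤ N))))
      ↔ ((c % (K+2) = 1 ∧ 1 ≤ c / (K+2))
       ∨ (2 ≤ c % (K+2) ∧ c % (K+2) ≤ min N K ∧ c % (K+2) ≤ c / (K+2)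
           ∧ (c % (K+2) < jc+1 ∨ c / (K+2) = c % (K+2)
               ∨ (c % (K+2) = jc+1 ∧ c / (K+2) ≤ jc+1)))) := by
    omega
  rw [if_congr hiff rfl rfl]

theorem fillB_small (N K : Nat) (h : min N K ≤ 1) :
    fillB N K 2 2 = fillB N K (min N K + 1) (min N K + 1) := by
  unfold fillB
  apply List.map_congr_left
  intro c _
  have hiff : ((c % (K+2) = 1 ∧ 1 ≤ c / (K+2))
       ∨ (2 ≤ c % (K+2) ∧ c % (K+2) ≤ min N K ∧ c % (K+2) ≤ c / (K+2)
           ∧ (c % (K+2) < 2 ∨ c / (K+2) = c % (K+2) ∨ (c % (K+2) = 2 ∧ c / (K+2) ≤ 2))))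
      ↔ ((c % (K+2) = 1 ∧ 1 ≤ c / (K+2))
       ∨ (2 ≤ c % (K+2) ∧ c % (K+2) ≤ min N K ∧ c % (K+2) ≤ c / (K+2)
           ∧ (c % (K+2) < min N K + 1 ∨ c / (K+2) = c % (K+2)
               ∨ (c % (K+2) = min N K + 1 ∧ c / (K+2) ≤ min N K + 1)))) := by
    omega
  rw [if_congr hiff rfl rfl]

-- Stirling recurrence in the form the machine computes
theorem S_machine (i jc : Nat) (hi : 1 ≤ i) (hj : 1 ≤ jc) :
    (jc:Int) * S (i-1) jc + S (i-1) (jc-1) = S i jc := by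
  obtain ⟨m, rfl⟩ : ∃ m, i = m+1 := ⟨i-1, by omega⟩
  obtain ⟨q, rfl⟩ : ∃ q, jc = q+1 := ⟨jc-1, by omega⟩
  simp only [Nat.add_sub_cancel]
  rw [S_ss m q]
  push_cast
  ring

-- one machine step: descent push
theorem stepB_desc (N K jc i : Nat) (rest : List Int) (h2 : 2 ≤ jc)
    (hlim : jc ≤ min N K) (hi : jc + 2 ≤ i) (hiN : i ≤ N) :
    stepB ((K:Int)+2) (fillB N K jc jc) (codeI K i jc :: rest)
      = (fillB N K jc jc, codeI K (i-1) jc :: codeI K i jc :: rest) := by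
  have hc : (fillB N K jc jc).getD (codeI K i jc).toNat none = none := by
    rw [codeI_toNat, fillB_getD N K jc jc i jc hiN (by omega), if_neg (by omega)]
  have ha : (fillB N K jc jc).getD (codeI K i jc - ((K:Int)+2)).toNat none = none := by
    rw [codeI_sub K i jc (by omega), codeI_toNat,
      fillB_getD N K jc jc (i-1) jc (by omega) (by omega), if_neg (by omega)]
  simp only [stepB, hc, ha]
  rw [codeI_sub K i jc (by omega)]

-- one machine step: compute the top cell from its two parents
theorem stepB_comp (N K jc i : Nat) (rest : List Int) (h2 : 2 ≤ jc)
    (hlim : jc ≤ min N K) (hi : jc + 1 ≤ i) (hiN : i ≤ N) :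
    stepB ((K:Int)+2) (fillB N K jc (i-1)) (codeI K i jc :: rest)
      = (fillB N K jc i, rest) := by
  have hc : (fillB N K jc (i-1)).getD (codeI K i jc).toNat none = none := by
    rw [codeI_toNat, fillB_getD N K jc (i-1) i jc hiN (by omega), if_neg (by omega)]
  have ha : (fillB N K jc (i-1)).getD (codeI K i jc - ((K:Int)+2)).toNat none
      = some (S (i-1) jc) := by
    rw [codeI_sub K i jc (by omega), codeI_toNat,
      fillB_getD N K jc (i-1) (i-1) jc (by omega) (by omega), if_pos (by omega)]
  have hb : (fillB N K jc (i-1)).getD ((codeI K i jc - ((K:Int)+2)) - 1).toNat none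
      = some (S (i-1) (jc-1)) := by
    rw [codeI_sub K i jc (by omega), codeI_sub_one K (i-1) jc (by omega), codeI_toNat,
      fillB_getD N K jc (i-1) (i-1) (jc-1) (by omega) (by omega), if_pos (by omega)]
  simp only [stepB, hc, ha, hb]
  rw [codeI_mod K i jc (by omega), S_machine i jc (by omega) (by omega), codeI_toNat,
    fillB_set N K jc i h2 hlim (by omega) hiN]

-- one machine step: pop an already-memoized (diagonal) cell
theorem stepB_pop (N K jc ic : Nat) (rest : List Int) (h2 : 2 ≤ jc)
    (hlim : jc ≤ min N K) :
    stepB ((K:Int)+2) (fillB N K jc ic) (codeI K jc jc :: rest)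
      = (fillB N K jc ic, rest) := by
  have hc : (fillB N K jc ic).getD (codeI K jc jc).toNat none = some (S jc jc) := by
    rw [codeI_toNat, fillB_getD N K jc ic jc jc (by omega) (by omega), if_pos (by omega)]
  simp only [stepB, hc]

def chainB (N K j i : Nat) : List Int :=
  (List.range (N+1-i)).map (fun t => codeI K (i+t) j)

theorem chainB_cons (N K j i : Nat) (h : i ≤ N) :
    chainB N K j i = codeI K i j :: chainB N K j (i+1) := by
  unfold chainB
  rw [show N+1-i = (N-i)+1 by omega, List.range_succ_eq_map, List.map_cons, List.map_map,
    show N+1-(i+1) = N-i by omega, Nat.add_zero]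
  congr 1
  apply List.map_congr_left
  intro t _
  show codeI K (i + (t+1)) j = codeI K (i+1+t) j
  rw [show i + (t+1) = i+1+t by omega]

theorem chainB_last (N K j : Nat) : chainB N K j N = [codeI K N j] := by
  unfold chainB
  rw [show N+1-N = 1 by omega]
  rfl

theorem chainB_nil (N K j : Nat) : chainB N K j (N+1) = [] := by
  unfold chainB
  rw [Nat.sub_self]
  rfl

theorem runB_nil (W : Int) (f : Nat) (m : List (Option Int)) :
    runB W f m [] = (m, []) := by cases f <;> rfl

theorem runB_succ_cons (W : Int) (f : Nat) (m : List (Option Int)) (c : Int) (cs : List Int) :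
    runB W (f+1) m (c::cs) = runB W f (stepB W m (c::cs)).1 (stepB W m (c::cs)).2 := rfl

theorem runB_one (W : Int) (m : List (Option Int)) (c : Int) (cs : List Int) :
    runB W 1 m (c::cs) = stepB W m (c::cs) := rfl

theorem runB_split (W : Int) (a b : Nat) :
    ∀ (m : List (Option Int)) (s : List Int),
    runB W (a+b) m s = (fun r : List (Option Int) × List Int => runB W b r.1 r.2)
      (runB W a m s) := by
  induction a with
  | zero => intro m s; rw [Nat.zero_add]; rfl
  | succ a ih =>
    intro m s
    cases s with
    | nil => simp [runB_nil]
    | cons c cs =>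
      rw [show a+1+b = (a+b)+1 by omega, runB_succ_cons, runB_succ_cons, ih]

theorem runB_desc (N K jc : Nat) (h2 : 2 ≤ jc) (hlim : jc ≤ min N K) :
    ∀ (d s : Nat), jc + 1 + d ≤ s → s ≤ N → ∀ rest,
    runB ((K:Int)+2) d (fillB N K jc jc) (chainB N K jc s ++ rest)
      = (fillB N K jc jc, chainB N K jc (s-d) ++ rest) := by
  intro d
  induction d with
  | zero => intro s _ _ rest; rfl
  | succ d ih =>
    intro s hs hsN rest
    rw [chainB_cons N K jc s (by omega), List.cons_append]
    rw [show d+1 = 1+d by omega, runB_split]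
    have hstep : runB ((K:Int)+2) 1 (fillB N K jc jc)
        (codeI K s jc :: (chainB N K jc (s+1) ++ rest))
        = (fillB N K jc jc, chainB N K jc (s-1) ++ rest) := by
      rw [runB_one, stepB_desc N K jc s _ h2 hlim (by omega) hsN,
        chainB_cons N K jc (s-1) (by omega), show s-1+1 = s by omega,
        chainB_cons N K jc s (by omega)]
      simp
    rw [hstep]
    show runB ((K:Int)+2) d (fillB N K jc jc) (chainB N K jc (s-1) ++ rest) = _
    have := ih (s-1) (by omega) (by omega) rest
    rw [this, show s-1-d = s-(1+d) by omega]

theorem runB_asc (N K jc : Nat) (h2 : 2 ≤ jc) (hlim : jc ≤ min N K) :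
    ∀ (u i : Nat), jc + 1 ≤ i → i + u ≤ N + 1 → ∀ rest,
    runB ((K:Int)+2) u (fillB N K jc (i-1)) (chainB N K jc i ++ rest)
      = (fillB N K jc (i-1+u), chainB N K jc (i+u) ++ rest) := by
  intro u
  induction u with
  | zero => intro i _ _ rest; rfl
  | succ u ih =>
    intro i hi hiN rest
    rw [chainB_cons N K jc i (by omega), List.cons_append]
    rw [show u+1 = 1+u by omega, runB_split]
    have hstep : runB ((K:Int)+2) 1 (fillB N K jc (i-1))
        (codeI K i jc :: (chainB N K jc (i+1) ++ rest))
        = (fillB N K jc i, chainB N K jc (i+1) ++ rest) := by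
      rw [runB_one, stepB_comp N K jc i _ h2 hlim hi (by omega)]
    rw [hstep]
    show runB ((K:Int)+2) u (fillB N K jc i) (chainB N K jc (i+1) ++ rest) = _
    have := ih (i+1) (by omega) (by omega) rest
    rw [show i+1-1 = i by omega] at this
    rw [this, show i+(1+u) = i+1+u by omega, show i-1+(1+u) = i+u by omega]

def stepsFor (N jc : Nat) : Nat := if jc = N then 1 else (N - (jc+1)) + (N - jc)

theorem runB_col (N K jc : Nat) (h2 : 2 ≤ jc) (hlim : jc ≤ min N K) (rest : List Int) :
    runB ((K:Int)+2) (stepsFor N jc) (fillB N K jc jc) (codeI K N jc :: rest)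
      = (fillB N K (jc+1) (jc+1), rest) := by
  by_cases hjN : jc = N
  · subst hjN
    rw [stepsFor, if_pos rfl, runB_one, stepB_pop jc K jc jc rest h2 hlim,
      fillB_next jc K jc]
  · have hjN' : jc < N := by omega
    rw [stepsFor, if_neg hjN, runB_split]
    have h1 : runB ((K:Int)+2) (N-(jc+1)) (fillB N K jc jc) (codeI K N jc :: rest)
        = (fillB N K jc jc, chainB N K jc (jc+1) ++ rest) := by
      have hd := runB_desc N K jc h2 hlim (N-(jc+1)) N (by omega) (le_refl N) rest
      rw [chainB_last, show N - (N-(jc+1)) = jc+1 by omega] at hd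
      rw [← hd]
      rfl
    rw [h1]
    show runB ((K:Int)+2) (N-jc) (fillB N K jc jc) (chainB N K jc (jc+1) ++ rest) = _
    have ha := runB_asc N K jc h2 hlim (N-jc) (jc+1) (by omega) (by omega) rest
    rw [show jc+1-1 = jc from by omega, show jc+(N-jc) = N from by omega,
      show jc+1+(N-jc) = N+1 from by omega, chainB_nil, List.nil_append] at ha
    rw [ha, fillB_next N K jc]

def seedsB (N K jc : Nat) : List Int :=
  (List.range' jc (min N K + 1 - jc)).map (fun j => codeI K N j)

def totB (N K jc : Nat) : Nat :=
  ((List.range' jc (min N K + 1 - jc)).map (stepsFor N)).sum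

theorem runB_outer (N K : Nat) :
    ∀ (cnt jc : Nat), 2 ≤ jc → jc + cnt = min N K + 1 →
    runB ((K:Int)+2) (totB N K jc) (fillB N K jc jc) (seedsB N K jc)
      = (fillB N K (min N K + 1) (min N K + 1), []) := by
  intro cnt
  induction cnt with
  | zero =>
    intro jc h2 hj
    have : min N K + 1 - jc = 0 := by omega
    rw [seedsB, totB, this]
    show runB _ 0 _ [] = _
    rw [show jc = min N K + 1 by omega]
    rfl
  | succ cnt ih =>
    intro jc h2 hj
    have hcnt : min N K + 1 - jc = cnt + 1 := by omega
    have hjlim : jc ≤ min N K := by omega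
    rw [seedsB, totB, hcnt, List.range'_succ, List.map_cons, List.map_cons,
      List.sum_cons, runB_split]
    have hseeds : (List.range' (jc+1) cnt).map (fun j => codeI K N j) = seedsB N K (jc+1) := by
      rw [seedsB, show min N K + 1 - (jc+1) = cnt by omega]
    rw [runB_col N K jc h2 hjlim _]
    have htot : ((List.range' (jc+1) cnt).map (stepsFor N)).sum = totB N K (jc+1) := by
      rw [totB, show min N K + 1 - (jc+1) = cnt by omega]
    show runB _ _ _ _ = _
    rw [hseeds, htot, ih (jc+1) (by omega) (by omega)]

theorem totB_le (N K : Nat) :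
    ∀ (cnt jc : Nat), jc + cnt = min N K + 1 →
    totB N K jc ≤ cnt * (2*N+1) := by
  intro cnt
  induction cnt with
  | zero => intro jc hj; rw [totB, show min N K + 1 - jc = 0 by omega]; simp
  | succ cnt ih =>
    intro jc hj
    rw [totB, show min N K + 1 - jc = cnt+1 by omega, List.range'_succ, List.map_cons,
      List.sum_cons]
    have h1 : stepsFor N jc ≤ 2*N+1 := by
      rw [stepsFor]; split_ifs <;> omega
    have h2 := ih (jc+1) (by omega)
    rw [totB, show min N K + 1 - (jc+1) = cnt by omega] at h2
    calc stepsFor N jc + ((List.range' (jc+1) cnt).map (stepsFor N)).sum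
        ≤ (2*N+1) + cnt * (2*N+1) := by omega
      _ = (cnt+1) * (2*N+1) := by ring



-- prefills: column 1 (S(i,1) = 1), then the diagonal (S(j,j) = 1)
theorem prefill1 (N K : Nat) : ∀ I, I ≤ N →
    (PySem.List.pyRange 1 ((I:Int)+1) 1).foldl
      (fun m i => m.set (i*((K:Int)+2)+1).toNat (some (1:Int)))
      (List.replicate ((N+1)*(K+2)) none)
    = (List.range ((N+1)*(K+2))).map (fun c =>
        if c % (K+2) = 1 ∧ 1 ≤ c / (K+2) ∧ c / (K+2) ≤ I then some 1 else none) := by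
  intro I
  induction I with
  | zero =>
    rw [PySem.List.pyRange_one_eq_nil (by omega), List.foldl_nil]
    intro _
    rw [show (fun c => if c % (K+2) = 1 ∧ 1 ≤ c / (K+2) ∧ c / (K+2) ≤ 0
          then some (1:Int) else none) = (fun _ => (none : Option Int)) from
        funext (fun c => if_neg (by omega)), List.map_const', List.length_range]
  | succ I ih =>
    intro hI
    rw [show ((I+1:Nat):Int)+1 = ((I:Int)+1)+1 from by push_cast; ring,
      PySem.List.pyRange_one_succ_right (by omega), List.foldl_append, ih (by omega),
      List.foldl_cons, List.foldl_nil,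
      show ((I:Int)+1)*((K:Int)+2)+1 = (((I+1)*(K+2)+1 : Nat) : Int) from by push_cast; ring,
      Int.toNat_natCast, map_range_set]
    apply List.map_congr_left
    intro c hc
    rw [List.mem_range] at hc
    by_cases hcc : c = (I+1)*(K+2)+1
    · subst hcc
      rw [if_pos rfl, code_mod K (I+1) 1 (by omega), code_div K (I+1) 1 (by omega),
        if_pos (by omega)]
    · rw [if_neg hcc]
      have hd := Nat.div_add_mod c (K+2)
      have hne : ¬(c / (K+2) = I+1 ∧ c % (K+2) = 1) := by
        rintro ⟨hp, hq⟩
        apply hcc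
        rw [← hd, hp, hq]; ring
      rw [if_congr (show (c % (K+2) = 1 ∧ 1 ≤ c / (K+2) ∧ c / (K+2) ≤ I)
          ↔ (c % (K+2) = 1 ∧ 1 ≤ c / (K+2) ∧ c / (K+2) ≤ I+1) from by omega) rfl rfl]

theorem prefill2 (N K : Nat) : ∀ J, J ≤ min N K →
    (PySem.List.pyRange 2 ((J:Int)+1) 1).foldl
      (fun m j => m.set (j*((K:Int)+2)+j).toNat (some (1:Int)))
      ((List.range ((N+1)*(K+2))).map (fun c =>
        if c % (K+2) = 1 ∧ 1 ≤ c / (K+2) ∧ c / (K+2) ≤ N then some 1 else none))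
    = (List.range ((N+1)*(K+2))).map (fun c =>
        if (c % (K+2) = 1 ∧ 1 ≤ c / (K+2) ∧ c / (K+2) ≤ N)
           ∨ (2 ≤ c % (K+2) ∧ c % (K+2) ≤ J ∧ c / (K+2) = c % (K+2))
        then some 1 else none) := by
  intro J
  induction J with
  | zero =>
    intro _
    rw [PySem.List.pyRange_one_eq_nil (by omega), List.foldl_nil]
    apply List.map_congr_left
    intro c _
    rw [if_congr (show (c % (K+2) = 1 ∧ 1 ≤ c / (K+2) ∧ c / (K+2) ≤ N)
        ↔ ((c % (K+2) = 1 ∧ 1 ≤ c / (K+2) ∧ c / (K+2) ≤ N)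
           ∨ (2 ≤ c % (K+2) ∧ c % (K+2) ≤ 0 ∧ c / (K+2) = c % (K+2))) from by omega) rfl rfl]
  | succ J ih =>
    intro hJ
    by_cases hJ0 : J = 0
    · subst hJ0
      rw [PySem.List.pyRange_one_eq_nil (by omega), List.foldl_nil]
      apply List.map_congr_left
      intro c _
      rw [if_congr (show (c % (K+2) = 1 ∧ 1 ≤ c / (K+2) ∧ c / (K+2) ≤ N)
          ↔ ((c % (K+2) = 1 ∧ 1 ≤ c / (K+2) ∧ c / (K+2) ≤ N)
             ∨ (2 ≤ c % (K+2) ∧ c % (K+2) ≤ 1 ∧ c / (K+2) = c % (K+2))) from by omega) rfl rfl]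
    · have hjK : J+1 < K+2 := by omega
      rw [show ((J+1:Nat):Int)+1 = ((J:Int)+1)+1 from by push_cast; ring,
        PySem.List.pyRange_one_succ_right (by omega), List.foldl_append, ih (by omega),
        List.foldl_cons, List.foldl_nil,
        show ((J:Int)+1)*((K:Int)+2)+((J:Int)+1) = (((J+1)*(K+2)+(J+1) : Nat) : Int) from by
          push_cast; ring,
        Int.toNat_natCast, map_range_set]
      apply List.map_congr_left
      intro c hc
      rw [List.mem_range] at hc
      by_cases hcc : c = (J+1)*(K+2)+(J+1)
      · subst hcc
        rw [if_pos rfl, code_mod K (J+1) (J+1) hjK, code_div K (J+1) (J+1) hjK,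
          if_pos (by omega)]
      · rw [if_neg hcc]
        have hd := Nat.div_add_mod c (K+2)
        have hne : ¬(c / (K+2) = J+1 ∧ c % (K+2) = J+1) := by
          rintro ⟨hp, hq⟩
          apply hcc
          rw [← hd, hp, hq]; ring
        rw [if_congr (show ((c % (K+2) = 1 ∧ 1 ≤ c / (K+2) ∧ c / (K+2) ≤ N)
             ∨ (2 ≤ c % (K+2) ∧ c % (K+2) ≤ J ∧ c / (K+2) = c % (K+2)))
            ↔ ((c % (K+2) = 1 ∧ 1 ≤ c / (K+2) ∧ c / (K+2) ≤ N)
             ∨ (2 ≤ c % (K+2) ∧ c % (K+2) ≤ J+1 ∧ c / (K+2) = c % (K+2))) from by omega) rfl rfl]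

-- the prefilled memo is the machine's initial state
theorem prefill_eq (N K : Nat) :
    (List.range ((N+1)*(K+2))).map (fun c =>
        if (c % (K+2) = 1 ∧ 1 ≤ c / (K+2) ∧ c / (K+2) ≤ N)
           ∨ (2 ≤ c % (K+2) ∧ c % (K+2) ≤ min N K ∧ c / (K+2) = c % (K+2))
        then some 1 else none)
    = fillB N K 2 2 := by
  unfold fillB
  apply List.map_congr_left
  intro c hc
  rw [List.mem_range] at hc
  have hp : c / (K+2) ≤ N := by
    have := (Nat.div_lt_iff_lt_mul (show 0 < K+2 by omega)).2
      (show c < (N+1)*(K+2) from hc)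
    omega
  by_cases h : (c % (K+2) = 1 ∧ 1 ≤ c / (K+2) ∧ c / (K+2) ≤ N)
      ∨ (2 ≤ c % (K+2) ∧ c % (K+2) ≤ min N K ∧ c / (K+2) = c % (K+2))
  · rw [if_pos h, if_pos (by omega)]
    rcases h with ⟨hq, hp1, _⟩ | ⟨_, _, hpq⟩
    · obtain ⟨m, hm⟩ : ∃ m, c / (K+2) = m+1 := ⟨c / (K+2) - 1, by omega⟩
      rw [hq, hm, S_one]
    · rw [hpq, S_diag]
  · rw [if_neg h, if_neg (by omega)]

-- the seed list, and the glue from the port's Int-level pieces to the Nat-level ones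
theorem stack0_eq (N K : Nat) :
    ((PySem.List.pyRange ((min N K : Nat) : Int) 1 (-1)).map
      (fun j => (N:Int)*((K:Int)+2)+j)).reverse = seedsB N K 2 := by
  rw [PySem.List.pyRange_neg_one_eq_reverse, List.map_reverse, List.reverse_reverse,
    seedsB, PySem.List.pyRange_one, List.range'_eq_map_range, List.map_map, List.map_map,
    show ((((min N K : Nat):Int) + 1 - (1 + 1))).toNat = min N K + 1 - 2 from by omega]
  apply List.map_congr_left
  intro t ht
  show (N:Int)*((K:Int)+2)+(1+1+(t:Int)) = codeI K N (2+t)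
  unfold codeI
  push_cast
  ring

theorem totB_le_fuel (N K : Nat) (h : 2 ≤ min N K) :
    totB N K 2 ≤ ((N+1)*(K+2))*2 + 4 := by
  have h1 := totB_le N K (min N K + 1 - 2) 2 (by omega)
  have h2 : (min N K + 1 - 2) * (2*N+1) ≤ K * (2*N+2) :=
    Nat.mul_le_mul (by omega) (by omega)
  have h3 : K * (2*N+2) = (K*(N+1))*2 := by ring
  have h4 : K*(N+1) ≤ (K+2)*(N+1) := Nat.mul_le_mul_right _ (by omega)
  have h5 : (N+1)*(K+2) = (K+2)*(N+1) := by ring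
  omega

-- closed values of single cells of A's table
theorem cellA_one (i : Nat) (h : 1 ≤ i) : cellA i 1 = 1 := by
  obtain ⟨n, rfl⟩ : ∃ n, i = n+1 := ⟨i-1, by omega⟩
  rw [show (1:Nat) = 0+1 from rfl, cellA_ss, if_pos (Or.inl rfl)]

theorem cellA_diag (i : Nat) (h : 1 ≤ i) : cellA i i = 1 := by
  obtain ⟨n, rfl⟩ : ∃ n, i = n+1 := ⟨i-1, by omega⟩
  rw [cellA_ss, if_pos (Or.inr rfl)]

theorem cellA_zero_col (i : Nat) : cellA i 0 = 0 := by cases i <;> rfl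

theorem cellA_zero_of_lt (i j : Nat) (h : i < j) (hj : 1 ≤ j) : cellA i j = 0 := by
  rw [cellA_eq_S i j (by omega), S_zero_of_lt i j h]

-- value of the Python row buffer before the slice assignment
theorem row2_get (K i j : Nat) (hj : j < K+1)
    (hlen : j < (if 2 ≤ i ∧ i ≤ K then ((List.replicate (K+1) (0:Int)).set 1 1).set i 1
        else (List.replicate (K+1) (0:Int)).set 1 1).length) :
    (if 2 ≤ i ∧ i ≤ K then ((List.replicate (K+1) (0:Int)).set 1 1).set i 1
     else (List.replicate (K+1) (0:Int)).set 1 1)[j]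
    = if j = 1 ∨ (j = i ∧ 2 ≤ i ∧ i ≤ K) then 1 else 0 := by
  split_ifs at hlen ⊢ with hcase
  · rw [List.getElem_set, List.getElem_set, List.getElem_replicate]
    by_cases h1 : i = j
    · rw [if_pos h1, if_pos (Or.inr ⟨h1.symm, hcase⟩)]
    · rw [if_neg h1]
      by_cases h2 : (1:Nat) = j
      · rw [if_pos h2, if_pos (Or.inl h2.symm)]
      · rw [if_neg h2, if_neg (by omega)]
  · rw [List.getElem_set, List.getElem_replicate]
    by_cases h2 : (1:Nat) = j
    · rw [if_pos h2, if_pos (Or.inl h2.symm)]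
    · rw [if_neg h2, if_neg (by omega)]

-- the assembled row equals row i of the Stirling table
theorem rowB (N K i : Nat) (hK : 1 ≤ K) (hi1 : 1 ≤ i) (hiN : i ≤ N) :
    (if 2 ≤ i ∧ i ≤ K then ((List.replicate (K+1) (0:Int)).set 1 1).set i 1
     else (List.replicate (K+1) (0:Int)).set 1 1).take 2
      ++ (((fillB N K (min N K + 1) (min N K + 1)).drop (i*(K+2)+2)).take (min i (K+1) - 2)).map
           (fun o => o.getD 0)
      ++ (if 2 ≤ i ∧ i ≤ K then ((List.replicate (K+1) (0:Int)).set 1 1).set i 1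
          else (List.replicate (K+1) (0:Int)).set 1 1).drop (max 2 (min i (K+1)))
    = (List.range (K+1)).map (fun j => cellA i j) := by
  have hfl : (fillB N K (min N K + 1) (min N K + 1)).length = (N+1)*(K+2) := by
    simp [fillB]
  have hrlen : (if 2 ≤ i ∧ i ≤ K then ((List.replicate (K+1) (0:Int)).set 1 1).set i 1
      else (List.replicate (K+1) (0:Int)).set 1 1).length = K+1 := by
    split_ifs <;> simp
  have hmid : i*(K+2) + min i (K+1) ≤ (N+1)*(K+2) := by
    have h1 : i*(K+2) + (K+2) = (i+1)*(K+2) := by ring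
    have h2 : (i+1)*(K+2) ≤ (N+1)*(K+2) := Nat.mul_le_mul_right _ (by omega)
    omega
  have htk : ((if 2 ≤ i ∧ i ≤ K then ((List.replicate (K+1) (0:Int)).set 1 1).set i 1
      else (List.replicate (K+1) (0:Int)).set 1 1).take 2).length = 2 := by
    rw [List.length_take, hrlen]; omega
  have hmidlen : ((((fillB N K (min N K + 1) (min N K + 1)).drop (i*(K+2)+2)).take
      (min i (K+1) - 2)).map (fun o => o.getD 0)).length = min i (K+1) - 2 := by
    rw [List.length_map, List.length_take, List.length_drop, hfl]; omega
  apply List.ext_getElem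
  · simp only [List.length_append, List.length_drop, List.length_map, List.length_range,
      htk, hmidlen, hrlen]
    omega
  · intro j hj1 hj2
    rw [List.length_map, List.length_range] at hj2
    rw [List.getElem_map, List.getElem_range]
    rcases Nat.lt_or_ge j 2 with hj | hj
    · rw [List.getElem_append_left (by rw [List.length_append, htk, hmidlen]; omega),
        List.getElem_append_left (by rw [htk]; omega), List.getElem_take,
        row2_get K i j (by omega) (by rw [hrlen]; omega)]
      rcases Nat.lt_or_ge j 1 with hj0 | hj0
      · rw [if_neg (by omega), show j = 0 from by omega, cellA_zero_col]
      · rw [if_pos (Or.inl (by omega)), show j = 1 from by omega, cellA_one i hi1]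
    · rcases Nat.lt_or_ge j (min i (K+1)) with hjm | hjm
      · rw [List.getElem_append_left (by rw [List.length_append, htk, hmidlen]; omega),
          List.getElem_append_right (by rw [htk]; omega)]
        simp only [htk, List.getElem_map, List.getElem_take, List.getElem_drop]
        have hread : (fillB N K (min N K + 1) (min N K + 1))[i*(K+2)+2 + (j-2)]'(by
            rw [hfl]; omega) = some (S i j) := by
          have hidx : i*(K+2)+2 + (j - 2) = i*(K+2)+j := by omega
          simp only [fillB, List.getElem_map, List.getElem_range, hidx]
          rw [code_div K i j (by omega), code_mod K i j (by omega), if_pos (by omega)]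
        rw [hread, cellA_eq_S i j (by omega)]
        rfl
      · rw [List.getElem_append_right (by rw [List.length_append, htk, hmidlen]; omega)]
        simp only [List.length_append, htk, hmidlen, List.getElem_drop]
        have hidx : max 2 (min i (K+1)) + (j - (2 + (min i (K+1) - 2))) = j := by omega
        simp only [hidx]
        rw [row2_get K i j (by omega) (by rw [hrlen]; omega)]
        by_cases hji : j = i ∧ 2 ≤ i ∧ i ≤ K
        · rw [if_pos (Or.inr hji), hji.1, cellA_diag i hi1]
        · rw [if_neg (by omega)]
          have hji2 : i < j := by omega
          rw [cellA_zero_of_lt i j hji2 (by omega)]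

theorem countP_alt_eq (N K : Nat) :
    countP_alt (N : Int) (K : Int)
      = (List.range (N+1)).map (fun i => (List.range (K+1)).map (fun j => cellA i j)) := by
  by_cases hK : 1 ≤ K
  · have h1K : (1:Int) ≤ (K:Int) := by omega
    simp only [countP_alt]
    rw [if_pos h1K, if_pos h1K,
      show ((N:Int)+1)*((K:Int)+2) = (((N+1)*(K+2) : Nat):Int) from by push_cast; ring,
      Int.toNat_natCast,
      show (if (N:Int) < (K:Int) then (N:Int) else (K:Int)) = ((min N K : Nat) : Int) from by
        split_ifs with h
        · rw [show min N K = N from by omega]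
        · rw [show min N K = K from by omega],
      prefill1 N K N (le_refl N), prefill2 N K (min N K) (le_refl _), prefill_eq N K,
      stack0_eq N K]
    have hrun : runB ((K:Int)+2) ((N+1)*(K+2)*2+4) (fillB N K 2 2) (seedsB N K 2)
        = (fillB N K (min N K + 1) (min N K + 1), []) := by
      by_cases h2 : 2 ≤ min N K
      · have hsplit := runB_split ((K:Int)+2) (totB N K 2) ((N+1)*(K+2)*2+4 - totB N K 2)
          (fillB N K 2 2) (seedsB N K 2)
        rw [show totB N K 2 + ((N+1)*(K+2)*2+4 - totB N K 2) = (N+1)*(K+2)*2+4 from by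
          have := totB_le_fuel N K h2; omega] at hsplit
        rw [hsplit, runB_outer N K (min N K - 1) 2 (by omega) (by omega)]
        show runB _ _ _ [] = _
        rw [runB_nil]
      · have hseeds : seedsB N K 2 = [] := by
          rw [seedsB, show min N K + 1 - 2 = 0 from by omega]
          rfl
        rw [hseeds, runB_nil, fillB_small N K (by omega)]
    rw [hrun,
      show ((fillB N K (min N K + 1) (min N K + 1), ([] : List Int)).1)
        = fillB N K (min N K + 1) (min N K + 1) from rfl,
      show (N:Int)+1 = ((N+1:Nat):Int) from by push_cast; ring,
      PySem.List.pyRange_zero_natCast, List.map_map]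
    apply List.map_congr_left
    intro i hi
    rw [List.mem_range] at hi
    show (if 1 ≤ (i:Int) ∧ 1 ≤ (K:Int) then _ else _) = _
    by_cases hi1 : 1 ≤ i
    · rw [if_pos ⟨by omega, h1K⟩,
        show ((K:Int)+1).toNat = K+1 from by omega,
        show ((i:Int)).toNat = i from by omega,
        show (if (i:Int) ≤ (K:Int)+1 then (i:Int) else (K:Int)+1)
          = ((min i (K+1) : Nat) : Int) from by
          split_ifs with h
          · rw [show min i (K+1) = i from by omega]
          · rw [show min i (K+1) = K+1 from by omega]; push_cast; ring,
        show (i:Int)*((K:Int)+2)+2 = ((i*(K+2)+2 : Nat) : Int) from by push_cast; ring,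
        show (i:Int)*((K:Int)+2)+((min i (K+1) : Nat) : Int)
          = ((i*(K+2)+min i (K+1) : Nat) : Int) from by push_cast; ring,
        PySem.List.slice_natCast,
        show i*(K+2)+min i (K+1) - (i*(K+2)+2) = min i (K+1) - 2 from by omega,
        show max (2:Int) ((min i (K+1) : Nat) : Int) = ((max 2 (min i (K+1)) : Nat) : Int)
          from by omega,
        Int.toNat_natCast,
        if_congr (show ((2:Int) ≤ (i:Int) ∧ (i:Int) ≤ (K:Int)) ↔ (2 ≤ i ∧ i ≤ K) from by
          omega) rfl rfl]
      exact rowB N K i hK hi1 (by omega)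
    · have hi0 : i = 0 := by omega
      subst hi0
      rw [if_neg (by omega), show ((K:Int)+1).toNat = K+1 from by omega,
        show (fun j => cellA 0 j) = (fun _ => (0:Int)) from funext (fun j => rfl),
        List.map_const', List.length_range]
  · have hK0 : K = 0 := by omega
    subst hK0
    simp only [countP_alt]
    rw [if_neg (by omega), if_neg (by omega),
      show (if (N:Int) < ((0:Nat):Int) then (N:Int) else ((0:Nat):Int)) = (0:Int) from by
        rw [if_neg (by omega)]; simp,
      PySem.List.pyRange_neg_one,
      show ((0:Int)-1).toNat = 0 from rfl]
    rw [show (N:Int)+1 = ((N+1:Nat):Int) from by push_cast; ring,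
      PySem.List.pyRange_zero_natCast, List.map_map]
    apply List.map_congr_left
    intro i hi
    show (if 1 ≤ (i:Int) ∧ 1 ≤ ((0:Nat):Int) then _ else _) = _
    rw [if_neg (by omega),
      show (((0:Nat):Int)+1).toNat = 1 from by omega]
    show List.replicate 1 (0:Int) = (List.range 1).map (fun j => cellA i j)
    simp only [List.range_one, List.map_cons, List.map_nil]
    show List.replicate 1 (0:Int) = [cellA i 0]
    rw [show cellA i 0 = 0 from by cases i <;> rfl]
    rfl

-- ===== VERDICT (by name: the statement is the Claim_ definition above) =====
theorem countP_spec : Claim_equal_countP := by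
  intro n k _ hpre
  unfold Spec_countP
  rcases hpre with ⟨hn, hk⟩ | ⟨hn, hk⟩
  · obtain ⟨N, rfl⟩ := Int.eq_ofNat_of_zero_le hn
    obtain ⟨K, rfl⟩ := Int.eq_ofNat_of_zero_le hk
    rw [countP_eq, countP_alt_eq]
  · have h1 : n + 1 ≤ 0 := by omega
    have h2 : k + 1 ≤ 0 := by omega
    simp [countP, countP_alt, PySem.List.pyRange_one_eq_nil h1,
      PySem.List.pyRange_one_eq_nil h2,
      PySem.List.pyRange_one_eq_nil (show n + 1 ≤ 1 by omega)]
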